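-- pv_equiv track=rewrite | github.com/Juanj01217/UNINORMA | deploy/Prototipo/api.py | _sample_questions_quick
-- ===== SOURCE A (Python) =====
-- def _sample_questions_quick(questions: list) -> list:
--     seen: set = set()
--     sampled = []
--     for q in questions:
--         cat = q.get("category", "")
--         if cat not in seen:
--             seen.add(cat)
--             sampled.append(q)
--         if len(sampled) >= 6:
--             break
--     return sampled
-- ===== SOURCE B (Python) =====
-- def _sample_questions_quick(questions: list) -> list:
--     kept = [q for i, q in enumerate(questions)
--             if all(p.get("category", "") != q.get("category", "")
--                    for p in questions[:i])]
--     return kept[:6]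
-- ===== Notes on version B (the rewrite author's own statement) =====
-- stated objective: alternative
-- what changed: Replaces the stateful seen-set loop with early break by a stateless brute-force filter: a question is kept iff no earlier question in the list has the same category (checked by rescanning the prefix questions[:i]), then the first 6 kept are sliced off.
import Mathlib
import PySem

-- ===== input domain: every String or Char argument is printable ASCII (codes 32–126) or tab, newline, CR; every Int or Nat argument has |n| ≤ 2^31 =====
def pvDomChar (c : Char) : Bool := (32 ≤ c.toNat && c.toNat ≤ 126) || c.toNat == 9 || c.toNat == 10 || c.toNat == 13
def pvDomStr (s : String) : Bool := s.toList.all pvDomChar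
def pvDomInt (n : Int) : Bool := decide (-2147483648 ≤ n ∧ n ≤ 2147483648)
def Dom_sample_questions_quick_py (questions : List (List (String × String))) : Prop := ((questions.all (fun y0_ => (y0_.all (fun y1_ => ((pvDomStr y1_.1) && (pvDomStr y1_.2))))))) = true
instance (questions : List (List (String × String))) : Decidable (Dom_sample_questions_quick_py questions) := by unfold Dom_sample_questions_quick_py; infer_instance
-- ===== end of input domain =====

-- B replaces A's stateful seen-set loop with a stateless brute-force prefix-rescan filter plus a final slice ('alternative'; not faster).

-- ===== PORT A =====
def goA : List (List (String × String)) → PySem.Set String → List (List (String × String)) → List (List (String × String))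
  | [], _, sampled => sampled
  | q :: rest, seen, sampled =>
    let cat := (PySem.Dict.mk q).getD "category" ""
    let seen' := if PySem.Set.contains seen cat then seen else PySem.Set.add seen cat
    let sampled' := if PySem.Set.contains seen cat then sampled else sampled ++ [q]
    if 6 ≤ sampled'.length then sampled' else goA rest seen' sampled'

def sample_questions_quick_py (questions : List (List (String × String))) : List (List (String × String)) :=
  goA questions PySem.Set.empty []

-- ===== PORT B =====
-- Source B: kept = [q for i, q in enumerate(questions) if all(p.get("category","") != q.get("category","") for p in questions[:i])]; return kept[:6]
def sample_questions_quick_py_alt (questions : List (List (String × String))) : List (List (String × String)) :=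
  let kept :=
    ((PySem.List.enumerate questions).filter (fun iq =>
        (PySem.List.slice questions none (some iq.1)).all
          (fun p => !((PySem.Dict.mk p).getD "category" "" == (PySem.Dict.mk iq.2).getD "category" "")))).map (fun iq => iq.2)
  PySem.List.slice kept none (some 6)

-- ===== PRECONDITION & SPEC =====
def Spec_sample_questions_quick_py (questions : List (List (String × String))) (out : List (List (String × String))) : Prop := out = sample_questions_quick_py_alt questions
instance (questions : List (List (String × String))) (out : List (List (String × String))) : Decidable (Spec_sample_questions_quick_py questions out) := by unfold Spec_sample_questions_quick_py; infer_instance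

-- ===== CLAIM (what is proved, stated in full; the proofs are below) =====
def Claim_equal_sample_questions_quick_py : Prop := ∀ (questions : List (List (String × String))), Dom_sample_questions_quick_py questions → Spec_sample_questions_quick_py questions (sample_questions_quick_py questions)

-- ===== LEMMAS AND PROOFS =====
def catOf (q : List (String × String)) : String := (PySem.Dict.mk q).getD "category" ""

-- first-seen-per-category selector, parameterized by a "category already seen" predicate
def fsel : (String → Bool) → List (List (String × String)) → List (List (String × String))
  | _, [] => []
  | p, q :: qs =>
    let cat := catOf q
    if p cat then fsel p qs else q :: fsel (fun c => c == cat || p c) qs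

theorem fsel_congr (qs : List (List (String × String))) :
    ∀ (p p' : String → Bool), (∀ c, p c = p' c) → fsel p qs = fsel p' qs := by
  induction qs with
  | nil => intro _ _ _; rfl
  | cons q rest ih =>
    intro p p' h
    simp only [fsel, h (catOf q)]
    split
    · exact ih p p' h
    · exact congrArg _ (ih _ _ (fun c => by rw [h c]))

theorem contains_add_eq (s : PySem.Set String) (x : String) :
    (fun c => PySem.Set.contains (PySem.Set.add s x) c) = (fun c => c == x || PySem.Set.contains s c) := by
  funext c
  simp [PySem.Set.add, PySem.Set.contains]
  by_cases hx : x ∈ s <;> by_cases hc : c = x <;> simp [hx, hc]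

theorem goA_eq_fsel (qs : List (List (String × String))) :
    ∀ (seen : PySem.Set String) (sampled : List (List (String × String))),
      sampled.length < 6 →
      goA qs seen sampled = sampled ++ (fsel (fun c => PySem.Set.contains seen c) qs).take (6 - sampled.length) := by
  induction qs with
  | nil => intro seen sampled _; simp [goA, fsel]
  | cons q rest ih =>
    intro seen sampled hlen
    by_cases hp : PySem.Set.contains seen (catOf q)
    · simp only [goA, fsel, catOf] at *
      simp only [hp, if_true]
      rw [if_neg (by omega)]
      exact ih seen sampled hlen
    · simp only [goA, fsel, catOf] at *
      simp only [hp, if_false, Bool.false_eq_true]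
      by_cases h6 : sampled.length + 1 = 6
      · rw [if_pos (by simp [h6])]
        have : 6 - sampled.length = 1 := by omega
        simp [this]
      · rw [if_neg (by simp; omega)]
        rw [ih _ _ (by simp; omega), contains_add_eq]
        have : 6 - sampled.length = (6 - (sampled ++ [q]).length) + 1 := by simp; omega
        simp [this, List.take_succ_cons]

theorem all_prefix_eq (pref : List (List (String × String))) (q : List (String × String)) :
    (pref.all (fun p => !(catOf p == catOf q))) = !decide (catOf q ∈ pref.map catOf) := by
  rw [Bool.eq_iff_iff]
  simp only [List.all_eq_true, List.mem_map, Bool.not_eq_eq_eq_not, Bool.not_true,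
    beq_eq_false_iff_ne, ne_eq, decide_eq_false_iff_not, not_exists, not_and]

theorem benum (L : List (List (String × String))) (qs : List (List (String × String))) :
    ∀ (pref : List (List (String × String))), L = pref ++ qs →
      ((PySem.List.enumerate qs (pref.length : Int)).filter (fun iq =>
          (PySem.List.slice L none (some iq.1)).all
            (fun p => !(catOf p == catOf iq.2)))).map (fun iq => iq.2)
        = fsel (fun c => decide (c ∈ pref.map catOf)) qs := by
  induction qs with
  | nil => intro pref _; simp [PySem.List.enumerate_nil, fsel]
  | cons q rest ih =>
    intro pref hL
    rw [PySem.List.enumerate_cons, List.filter_cons]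
    have hslice : PySem.List.slice L none (some ((pref.length : Nat) : Int)) = pref := by
      rw [PySem.List.slice_to_natCast, hL, List.take_left]
    rw [hslice, all_prefix_eq pref q]
    have hstep : ((pref.length : Int) + 1) = (((pref ++ [q]).length : Nat) : Int) := by
      simp
    by_cases hm : catOf q ∈ pref.map catOf
    · simp only [hm, decide_true, Bool.not_true, Bool.false_eq_true, if_false]
      rw [hstep, ih (pref ++ [q]) (by simp [hL])]
      have : fsel (fun c => decide (c ∈ pref.map catOf)) (q :: rest)
           = fsel (fun c => decide (c ∈ pref.map catOf)) rest := by
        simp [fsel, hm]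
      rw [this]
      exact fsel_congr rest _ _ (fun c => by
        simp only [List.map_append, List.map_cons, List.map_nil, List.mem_append, List.mem_singleton]
        by_cases hc : c = catOf q <;> simp [hc, hm])
    · simp only [hm, decide_false, Bool.not_false, if_true, List.map_cons]
      rw [hstep, ih (pref ++ [q]) (by simp [hL])]
      have : fsel (fun c => decide (c ∈ pref.map catOf)) (q :: rest)
           = q :: fsel (fun c => c == catOf q || decide (c ∈ pref.map catOf)) rest := by
        simp [fsel, hm]
      rw [this]
      exact congrArg _ (fsel_congr rest _ _ (fun c => by
        simp only [List.map_append, List.map_cons, List.map_nil, List.mem_append, List.mem_singleton]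
        by_cases hc : c = catOf q <;> simp [hc]))

-- ===== VERDICT (by name: the statement is the Claim_ definition above) =====
theorem sample_questions_quick_py_spec : Claim_equal_sample_questions_quick_py := by
  intro questions _
  unfold Spec_sample_questions_quick_py sample_questions_quick_py sample_questions_quick_py_alt
  rw [goA_eq_fsel _ _ _ (by simp)]
  have hB : PySem.List.enumerate questions = PySem.List.enumerate questions ((([] : List (List (String × String))).length : Nat) : Int) := rfl
  have hfold : (fun (iq : Int × List (String × String)) =>
      (PySem.List.slice questions none (some iq.1)).all
        (fun p => !((PySem.Dict.mk p).getD "category" "" == (PySem.Dict.mk iq.2).getD "category" "")))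
    = (fun iq => (PySem.List.slice questions none (some iq.1)).all (fun p => !(catOf p == catOf iq.2))) := rfl
  simp only [hB, hfold]
  rw [benum questions questions [] (by simp)]
  rw [show ((6 : Int)) = (((6 : Nat) : Nat) : Int) from rfl, PySem.List.slice_to_natCast]
  simp only [List.nil_append, List.length_nil, Nat.sub_zero]
  exact congrArg (List.take 6)
    (fsel_congr questions _ _ (fun c => by simp [PySem.Set.empty, PySem.Set.contains]))
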